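-- pv_equiv track=rewrite | github.com/k0ste/irq-tune | irq-tune.py | get_mask
-- ===== SOURCE A (Python) =====
-- def get_mask(selectedcpu):
--
--     cpumask = ""
--     for cpu in range(0, 48):
--         if(cpu == selectedcpu):
--             cpumask = "1" + cpumask
--         else:
--             cpumask = "0" + cpumask
--     return cpumask
-- ===== SOURCE B (Python) =====
-- def get_mask(selectedcpu):
--     if selectedcpu in range(48):
--         idx = int(selectedcpu)
--         return "0" * (47 - idx) + "1" + "0" * idx
--     return "0" * 48
-- ===== Notes on version B (the rewrite author's own statement) =====
-- stated objective: simpler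
-- what changed: Replaces the 48-iteration string-building loop with a closed-form construction that places the '1' directly by index and returns all zeros out of range.
import Mathlib
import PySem

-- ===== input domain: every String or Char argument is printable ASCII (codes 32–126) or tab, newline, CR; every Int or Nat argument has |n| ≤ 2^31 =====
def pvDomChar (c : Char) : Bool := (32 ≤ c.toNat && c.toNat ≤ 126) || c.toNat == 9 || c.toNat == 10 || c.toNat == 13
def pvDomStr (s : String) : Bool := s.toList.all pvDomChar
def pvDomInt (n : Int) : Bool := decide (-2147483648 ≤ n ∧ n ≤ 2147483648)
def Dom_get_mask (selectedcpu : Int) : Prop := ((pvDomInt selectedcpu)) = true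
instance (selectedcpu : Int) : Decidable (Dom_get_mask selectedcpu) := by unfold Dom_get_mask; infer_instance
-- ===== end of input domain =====

-- B replaces A's 48-iteration string-building loop with a closed-form placement of the '1' (objective: simpler).


-- ===== PORT A =====
def get_mask (selectedcpu : Int) : String :=
  (PySem.List.pyRange 0 48 1).foldl
    (fun cpumask cpu => if cpu == selectedcpu then "1" ++ cpumask else "0" ++ cpumask) ""

-- ===== PORT B =====
def get_mask_alt (selectedcpu : Int) : String :=
  if 0 ≤ selectedcpu ∧ selectedcpu < 48 then
    String.ofList (List.replicate (47 - selectedcpu.toNat) '0') ++ "1"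
      ++ String.ofList (List.replicate selectedcpu.toNat '0')
  else
    String.ofList (List.replicate 48 '0')

-- ===== PRECONDITION & SPEC =====
def Spec_get_mask (selectedcpu : Int) (out : String) : Prop := out = get_mask_alt selectedcpu
instance (selectedcpu : Int) (out : String) : Decidable (Spec_get_mask selectedcpu out) := by unfold Spec_get_mask; infer_instance

-- ===== CLAIM (what is proved, stated in full; the proofs are below) =====
def Claim_equal_get_mask : Prop := ∀ (selectedcpu : Int), Dom_get_mask selectedcpu → Spec_get_mask selectedcpu (get_mask selectedcpu)

-- ===== LEMMAS AND PROOFS =====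

-- ===== VERDICT (by name: the statement is the Claim_ definition above) =====
theorem get_mask_all_zero (n : Int) (h : ¬ (0 ≤ n ∧ n < 48)) :
    get_mask n = String.ofList (List.replicate 48 '0') := by
  have hcong : get_mask n
      = (PySem.List.pyRange 0 48 1).foldl (fun cpumask _ => "0" ++ cpumask) "" := by
    unfold get_mask
    apply PySem.List.foldl_congr_mem
    intro acc x hx
    have hx' := (PySem.List.mem_pyRange_one).mp hx
    have hne : (x == n) = false := by
      simp only [beq_eq_false_iff_ne, ne_eq]
      rintro rfl; exact h ⟨hx'.1, hx'.2⟩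
    simp [hne]
  rw [hcong]; decide

theorem get_mask_spec : Claim_equal_get_mask := by
  intro n _
  unfold Spec_get_mask
  by_cases h : 0 ≤ n ∧ n < 48
  · obtain ⟨h0, h1⟩ := h
    lift n to ℕ using h0 with m
    have hm : m < 48 := by exact_mod_cast h1
    interval_cases m <;> decide
  · rw [get_mask_all_zero n h]
    unfold get_mask_alt
    rw [if_neg h]
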